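-- pv_equiv track=rewrite | github.com/Pierre-Yves1/ex3debackADS | Code_lectures_2526/Lecture2/dodona_dubbels.py | dubbels
-- ===== SOURCE A (Python) =====
-- def dubbels(list):
--     eenmaal = set() #set ipv list aanmaken want geen dubbels erin!
--     meermaals = set()
--     for x in list:
--         if list.count(x) == 1:
--             eenmaal.add(x)
--         elif list.count(x) >= 2:
--             meermaals.add(x)
--     return eenmaal, meermaals
-- ===== SOURCE B (Python) =====
-- def dubbels(list):
--     freq = {}
--     for x in list:
--         freq[x] = freq.get(x, 0) + 1
--     eenmaal = {x for x, n in freq.items() if n == 1}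
--     meermaals = {x for x, n in freq.items() if n >= 2}
--     return eenmaal, meermaals
-- ===== Notes on version B (the rewrite author's own statement) =====
-- stated objective: faster
-- what changed: B builds a frequency dict in one pass and derives both sets by filtering the dict's distinct keys, instead of A's per-element list.count scans.
import Mathlib
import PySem

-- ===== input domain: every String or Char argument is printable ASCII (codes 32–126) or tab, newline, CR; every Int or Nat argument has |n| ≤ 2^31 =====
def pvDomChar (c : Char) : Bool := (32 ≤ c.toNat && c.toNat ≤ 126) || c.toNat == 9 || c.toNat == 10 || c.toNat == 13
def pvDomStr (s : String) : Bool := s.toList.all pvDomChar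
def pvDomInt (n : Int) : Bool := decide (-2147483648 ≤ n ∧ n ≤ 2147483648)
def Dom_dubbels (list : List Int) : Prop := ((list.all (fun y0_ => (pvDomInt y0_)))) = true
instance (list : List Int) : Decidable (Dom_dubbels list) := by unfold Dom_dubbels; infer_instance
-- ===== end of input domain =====

-- B replaces A's per-element list.count scans by one frequency dict built in a single
-- pass, then filters the dict's distinct keys; return value only (sets of ints).

-- ===== PORT A =====
def dubbels (list : List Int) : List Int × List Int :=
  list.foldl (fun acc x =>
      if list.count x = 1 then (PySem.Set.add acc.1 x, acc.2)
      else if 2 ≤ list.count x then (acc.1, PySem.Set.add acc.2 x)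
      else acc)
    (PySem.Set.empty, PySem.Set.empty)

-- ===== PORT B =====
-- the frequency-dict loop ('freq' in Source B)
def dubbelsFreq (list : List Int) : PySem.Dict Int Int :=
  list.foldl (fun d x => d.insert x (d.getD x 0 + 1)) PySem.Dict.empty

def dubbels_alt (list : List Int) : List Int × List Int :=
  (((dubbelsFreq list).items.filter (fun p => p.2 == 1)).map (·.1),
   ((dubbelsFreq list).items.filter (fun p => 2 ≤ p.2)).map (·.1))

-- ===== PRECONDITION & SPEC =====
def Spec_dubbels (list : List Int) (out : List Int × List Int) : Prop := out = dubbels_alt list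
instance (list : List Int) (out : List Int × List Int) : Decidable (Spec_dubbels list out) := by unfold Spec_dubbels; infer_instance

-- ===== CLAIM (what is proved, stated in full; the proofs are below) =====
def Claim_equal_dubbels : Prop := ∀ (list : List Int), Dom_dubbels list → Spec_dubbels list (dubbels list)

-- ===== LEMMAS AND PROOFS =====

-- filtering a Python set: Set.add commutes with List.filter
lemma set_add_filter (p : Int → Bool) (s : List Int) (a : Int) :
    (PySem.Set.add s a).filter p = if p a then PySem.Set.add (s.filter p) a else s.filter p := by
  simp only [PySem.Set.add, PySem.Set.contains]
  by_cases hs : a ∈ s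
  · by_cases hp : p a
    · simp [hs, hp, List.mem_filter]
    · simp [hs, hp]
  · by_cases hp : p a
    · simp [hs, hp, List.filter_append, List.mem_filter]
    · simp [hs, hp, List.filter_append]

lemma set_update_filter (p : Int → Bool) (l : List Int) (s : List Int) :
    (PySem.Set.update s l).filter p = PySem.Set.update (s.filter p) (l.filter p) := by
  induction l generalizing s with
  | nil => simp [PySem.Set.update]
  | cons a l ih =>
    simp only [PySem.Set.update, List.foldl_cons, List.filter_cons] at *
    rw [ih, set_add_filter]
    by_cases hp : p a <;> simp [hp]

lemma set_ofList_filter (p : Int → Bool) (l : List Int) :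
    PySem.Set.ofList (l.filter p) = (PySem.Set.ofList l).filter p := by
  have := set_update_filter p l []
  simpa [PySem.Set.ofList_eq_foldl, PySem.Set.update] using this.symm

-- A's loop, characterised: it updates the two sets with the two filtered sublists
lemma dubbels_foldl (list l : List Int) (e m : List Int) :
    l.foldl (fun acc x =>
        if list.count x = 1 then (PySem.Set.add acc.1 x, acc.2)
        else if 2 ≤ list.count x then (acc.1, PySem.Set.add acc.2 x)
        else acc) (e, m)
    = (PySem.Set.update e (l.filter fun x => decide (list.count x = 1)),
       PySem.Set.update m (l.filter fun x => decide (list.count x ≠ 1 ∧ 2 ≤ list.count x))) := by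
  induction l generalizing e m with
  | nil => simp [PySem.Set.update]
  | cons a l ih =>
    simp only [List.foldl_cons, List.filter_cons]
    by_cases h1 : list.count a = 1
    · simpa [h1, PySem.Set.update] using ih (PySem.Set.add e a) m
    · by_cases h2 : 2 ≤ list.count a
      · simpa [h1, h2, PySem.Set.update] using ih e (PySem.Set.add m a)
      · simpa [h1, h2] using ih e m

theorem dubbels_eq_alt (list : List Int) : dubbels list = dubbels_alt list := by
  unfold dubbels dubbels_alt dubbelsFreq
  rw [PySem.Dict.foldl_insert_getD_add_one_eq_counter, PySem.Dict.items_counter]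
  rw [dubbels_foldl]
  simp only [List.filter_map, List.map_map, Function.comp_def]
  rw [show PySem.Set.empty = ([] : List Int) from rfl]
  have hupd : ∀ l : List Int, PySem.Set.update ([] : List Int) l = PySem.Set.ofList l := by
    intro l; rfl
  rw [hupd, hupd, set_ofList_filter, set_ofList_filter]
  simp only [List.map_id', Prod.mk.injEq]
  refine ⟨List.filter_congr ?_, List.filter_congr ?_⟩
  · intro x _
    by_cases h : List.count x list = 1 <;> simp [h]
  · intro x _
    by_cases h : 2 ≤ List.count x list <;> simp [h]
    omega

-- ===== VERDICT (by name: the statement is the Claim_ definition above) =====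
theorem dubbels_spec : Claim_equal_dubbels := by
  intro list _
  exact dubbels_eq_alt list
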